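-- pv_equiv track=rewrite | github.com/Tolkken/LabCripto | Receptor.py | determinar_mas_probable
-- ===== SOURCE A (Python) =====
-- def es_palabra_reconocida(palabra):
--     palabras_comunes = {
--         "hola", "con", "todo", "respeto", "mensaje", "este", "es", "un", "de", "en", "el",
--         "la", "seguridad", "criptografia", "redes", "respetuosamente"
--     }
--     return palabra in palabras_comunes
--
-- def determinar_mas_probable(opciones):
--     puntuaciones = []
--     for texto in opciones:
--         palabras = texto.split()
--         score = sum(1 for palabra in palabras if es_palabra_reconocida(palabra))
--         puntuaciones.append(score)
--
--     mejor_indice = puntuaciones.index(max(puntuaciones))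
--     return mejor_indice
-- ===== SOURCE B (Python) =====
-- _COMUNES = frozenset({
--     "hola", "con", "todo", "respeto", "mensaje", "este", "es", "un", "de", "en", "el",
--     "la", "seguridad", "criptografia", "redes", "respetuosamente"
-- })
--
-- def determinar_mas_probable(opciones):
--     if not opciones:
--         raise ValueError("max() arg is an empty sequence")
--     best_i = 0
--     best_s = sum(w in _COMUNES for w in opciones[0].split())
--     for i, texto in enumerate(opciones[1:], 1):
--         s = sum(w in _COMUNES for w in texto.split())
--         if s > best_s:
--             best_i, best_s = i, s
--     return best_i
-- ===== Notes on version B (the rewrite author's own statement) =====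
-- stated objective: simpler
-- what changed: Single pass tracking best index/score with a strict-greater update (first max wins), never materializing the per-option score list nor calling max()/.index().
import Mathlib
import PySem

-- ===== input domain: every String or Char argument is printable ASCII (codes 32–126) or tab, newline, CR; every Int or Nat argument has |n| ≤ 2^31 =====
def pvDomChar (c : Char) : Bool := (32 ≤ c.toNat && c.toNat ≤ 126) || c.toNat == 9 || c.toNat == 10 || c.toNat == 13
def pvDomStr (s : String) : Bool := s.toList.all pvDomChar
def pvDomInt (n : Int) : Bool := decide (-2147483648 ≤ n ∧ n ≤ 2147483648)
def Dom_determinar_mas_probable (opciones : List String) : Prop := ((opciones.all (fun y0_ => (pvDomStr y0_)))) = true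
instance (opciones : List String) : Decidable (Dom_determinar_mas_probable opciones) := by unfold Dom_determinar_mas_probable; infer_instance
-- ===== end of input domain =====

-- B replaces A's score-list + max() + .index() three-pass structure by a single pass keeping
-- (best index, best score) with a strict-greater update (first max wins); objective: simpler.

-- ===== PORT A =====
def palabras_comunes : List String :=
  ["hola", "con", "todo", "respeto", "mensaje", "este", "es", "un", "de", "en", "el",
   "la", "seguridad", "criptografia", "redes", "respetuosamente"]

def es_palabra_reconocida (palabra : String) : Bool := palabras_comunes.contains palabra

def determinar_mas_probable (opciones : List String) : Int :=
  let puntuaciones := opciones.foldl (fun acc texto =>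
    let palabras := PySem.Str.split₀ texto
    let score := palabras.foldl (fun s palabra =>
      if es_palabra_reconocida palabra then s + 1 else s) (0 : Int)
    acc ++ [score]) []
  match PySem.List.max? puntuaciones (fun y => y) with
  | none => 0   -- max([]) raises ValueError; excluded by Pre_
  | some m =>
    match PySem.List.index? puntuaciones m with
    | some i => (i : Int)
    | none => 0   -- unreachable: the max is a member

-- ===== PORT B =====
def comunesB : List String :=
  ["hola", "con", "todo", "respeto", "mensaje", "este", "es", "un", "de", "en", "el",
   "la", "seguridad", "criptografia", "redes", "respetuosamente"]

def scoreB (texto : String) : Int :=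
  ((PySem.Str.split₀ texto).map (fun w => if comunesB.contains w then (1 : Int) else 0)).sum

def determinar_mas_probable_alt (opciones : List String) : Int :=
  match opciones with
  | [] => 0   -- raise ValueError; excluded by Pre_
  | t0 :: rest =>
    let r := (PySem.List.enumerate rest 1).foldl
      (fun (st : Int × Int) (p : Int × String) =>
        let s := scoreB p.2
        if s > st.2 then (p.1, s) else st)
      ((0 : Int), scoreB t0)
    r.1

-- ===== PRECONDITION & SPEC =====
-- Pre_ excludes only the empty list, where A's max([]) raises ValueError (B raises ValueError too).
def Pre_determinar_mas_probable (opciones : List String) : Prop := opciones ≠ []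
instance (opciones : List String) : Decidable (Pre_determinar_mas_probable opciones) := by
  unfold Pre_determinar_mas_probable; infer_instance

def pvWitness_determinar_mas_probable : List String := ["hola mundo", "es un mensaje de hola"]

def Spec_determinar_mas_probable (opciones : List String) (out : Int) : Prop := out = determinar_mas_probable_alt opciones
instance (opciones : List String) (out : Int) : Decidable (Spec_determinar_mas_probable opciones out) := by unfold Spec_determinar_mas_probable; infer_instance

-- ===== CLAIM (what is proved, stated in full; the proofs are below) =====
def Claim_equal_determinar_mas_probable : Prop := ∀ (opciones : List String), Dom_determinar_mas_probable opciones → Pre_determinar_mas_probable opciones → Spec_determinar_mas_probable opciones (determinar_mas_probable opciones)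

-- ===== LEMMAS AND PROOFS =====

-- A's per-text score loop computes B's per-text score
theorem score_eq (t : String) :
    (PySem.Str.split₀ t).foldl (fun s palabra =>
      if es_palabra_reconocida palabra then s + 1 else s) (0 : Int) = scoreB t := by
  rw [PySem.List.foldl_count_if, scoreB, PySem.List.sum_map_ite_one_zero]
  rw [zero_add]
  congr 1

-- closed form of B's loop over the enumerated tail: final score is the running max,
-- final index points at the first occurrence of that max
theorem loop_closed (xs : List String) (i bi bs : Int) :
    (PySem.List.enumerate xs i).foldl
      (fun (st : Int × Int) (p : Int × String) =>
        let s := scoreB p.2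
        if s > st.2 then (p.1, s) else st) (bi, bs)
    = (if (xs.map scoreB).foldl max bs ≤ bs then (bi, bs)
       else (i + (((PySem.List.index? (xs.map scoreB) ((xs.map scoreB).foldl max bs)).getD 0 : Nat) : Int),
             (xs.map scoreB).foldl max bs)) := by
  induction xs generalizing i bi bs with
  | nil => simp [PySem.List.enumerate]
  | cons x xs ih =>
    rw [PySem.List.enumerate_cons, List.foldl_cons]
    simp only [List.map_cons, List.foldl_cons]
    by_cases hx : scoreB x > bs
    · simp only [hx, reduceIte]
      rw [ih]
      have hmax : max bs (scoreB x) = scoreB x := max_eq_right (le_of_lt hx)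
      rw [hmax]
      set M := (xs.map scoreB).foldl max (scoreB x) with hM
      have hxM : scoreB x ≤ M := (PySem.List.le_foldl_max _ _).1
      have hbsM : bs < M := lt_of_lt_of_le hx hxM
      by_cases hMx : M ≤ scoreB x
      · have hMeq : M = scoreB x := le_antisymm hMx hxM
        rw [if_pos hMx, if_neg (not_le.mpr hbsM), hMeq, PySem.List.index?_cons_self]
        simp
      · rw [if_neg hMx, if_neg (not_le.mpr hbsM)]
        have hne : scoreB x ≠ M := fun h => hMx (le_of_eq h.symm)
        rw [PySem.List.index?_cons_of_ne _ hne]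
        have hMmem : M ∈ xs.map scoreB := by
          rcases PySem.List.foldl_max_mem (xs.map scoreB) (scoreB x) with h | h
          · exact absurd h.le hMx
          · exact h
        obtain ⟨k, hk⟩ := Option.isSome_iff_exists.mp ((PySem.List.index?_isSome_iff _ _).mpr hMmem)
        rw [hk]
        simp
        ring
    · simp only [hx, reduceIte]
      rw [ih]
      have hmax : max bs (scoreB x) = bs := max_eq_left (not_lt.mp hx)
      rw [hmax]
      set M := (xs.map scoreB).foldl max bs with hM
      by_cases hMb : M ≤ bs
      · rw [if_pos hMb, if_pos hMb]
      · rw [if_neg hMb, if_neg hMb]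
        have hne : scoreB x ≠ M := fun h => hMb (h ▸ (not_lt.mp hx))
        rw [PySem.List.index?_cons_of_ne _ hne]
        have hMmem : M ∈ xs.map scoreB := by
          rcases PySem.List.foldl_max_mem (xs.map scoreB) bs with h | h
          · exact absurd h.le hMb
          · exact h
        obtain ⟨k, hk⟩ := Option.isSome_iff_exists.mp ((PySem.List.index?_isSome_iff _ _).mpr hMmem)
        rw [hk]
        simp
        ring

theorem main_eq (opciones : List String) (h : opciones ≠ []) :
    determinar_mas_probable opciones = determinar_mas_probable_alt opciones := by
  match opciones with
  | t0 :: rest =>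
    unfold determinar_mas_probable determinar_mas_probable_alt
    simp only [PySem.List.foldl_append_singleton_eq_map, List.nil_append]
    have hmapeq : List.map (fun texto => (PySem.Str.split₀ texto).foldl (fun s palabra =>
        if es_palabra_reconocida palabra then s + 1 else s) (0:Int)) (t0 :: rest)
        = List.map scoreB (t0 :: rest) := List.map_congr_left (fun t _ => score_eq t)
    rw [hmapeq, List.map_cons, PySem.List.max?_id_cons, loop_closed]
    set M := (rest.map scoreB).foldl max (scoreB t0) with hM
    have hx0M : scoreB t0 ≤ M := (PySem.List.le_foldl_max _ _).1
    by_cases hMx : M ≤ scoreB t0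
    · have hMeq : M = scoreB t0 := le_antisymm hMx hx0M
      rw [if_pos hMx, hMeq]
      simp [List.idxOf?_cons]
    · rw [if_neg hMx]
      have hne : scoreB t0 ≠ M := fun h' => hMx h'.ge
      have hMmem : M ∈ rest.map scoreB := by
        rcases PySem.List.foldl_max_mem (rest.map scoreB) (scoreB t0) with h' | h'
        · exact absurd h'.le hMx
        · exact h'
      obtain ⟨k, hk⟩ := Option.isSome_iff_exists.mp ((PySem.List.index?_isSome_iff _ _).mpr hMmem)
      simp only [PySem.List.index?_eq_idxOf?] at hk
      simp [List.idxOf?_cons, hk, if_neg hne]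
      omega

-- ===== VERDICT (by name: the statement is the Claim_ definition above) =====
theorem determinar_mas_probable_spec : Claim_equal_determinar_mas_probable := by
  intro opciones _ hpre
  unfold Spec_determinar_mas_probable
  exact main_eq opciones hpre
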